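-- pv_equiv track=rewrite | github.com/cybelewang/leetcode-python | code657JudgeRouteCircle.py | judgeCircle2
-- ===== SOURCE A (Python) =====
-- def judgeCircle2(moves):
--     """
--     :type moves: str
--     :rtype: bool
--     """
--     x, y = 0, 0
--     offset = {'U':(0, 1), 'D':(0,-1), 'L':(-1,0), 'R':(1,0)}
--     history = {(x, y)}
--     for dir in moves:
--         dx, dy = offset[dir]
--         x, y = x+dx, y+dy
--         if (x, y) in history:
--             return True
--         history.add((x,y))
--
--     return False
-- ===== SOURCE B (Python) =====
-- def judgeCircle2(moves):
--     dxs = {'U': 0, 'D': 0, 'L': -1, 'R': 1}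
--     dys = {'U': 1, 'D': -1, 'L': 0, 'R': 0}
--     xs = [0]
--     ys = [0]
--     for m in moves:
--         xs.append(xs[-1] + dxs[m])
--         ys.append(ys[-1] + dys[m])
--     positions = list(zip(xs, ys))
--     return any(positions.count(p) > 1 for p in positions)
-- ===== Notes on version B (the rewrite author's own statement) =====
-- stated objective: alternative
-- what changed: B replaces the running (x,y) pair plus incremental history set and per-step membership test/early return by two separately accumulated coordinate lists that are zipped into the visited-position list, with the revisit detected afterwards by occurrence counting (any(positions.count(p) > 1)).
-- outside the precondition, e.g. on judgeCircle2('DUa'): A returns True, B raises KeyError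
import Mathlib
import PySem

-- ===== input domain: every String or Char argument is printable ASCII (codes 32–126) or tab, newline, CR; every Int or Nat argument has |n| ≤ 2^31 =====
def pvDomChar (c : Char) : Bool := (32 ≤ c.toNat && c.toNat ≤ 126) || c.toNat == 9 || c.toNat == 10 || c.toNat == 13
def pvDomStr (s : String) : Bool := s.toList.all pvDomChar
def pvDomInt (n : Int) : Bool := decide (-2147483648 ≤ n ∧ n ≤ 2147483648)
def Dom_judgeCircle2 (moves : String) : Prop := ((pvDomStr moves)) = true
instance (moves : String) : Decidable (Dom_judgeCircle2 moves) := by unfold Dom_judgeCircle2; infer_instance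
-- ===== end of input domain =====

-- B drops the running history set and the per-step membership test: it accumulates the x- and
-- y-coordinate lists separately, zips them into the visited-position list, and detects a revisit
-- afterwards by counting occurrences (objective: alternative; B is quadratic, not faster).


-- ===== PORT A =====
-- A's literal dict {'U':(0,1),'D':(0,-1),'L':(-1,0),'R':(1,0)}; the fallback (0, 0) is never
-- reached under Pre_ (a missing key is Python's KeyError, excluded by Pre_judgeCircle2)
def pvOffset (c : Char) : Int × Int :=
  if c = 'U' then (0, 1)
  else if c = 'D' then (0, -1)
  else if c = 'L' then (-1, 0)
  else if c = 'R' then (1, 0)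
  else (0, 0)

-- A's loop: step, test membership in the history set, early-return True, else add
def pvLoopA : List Char → Int × Int → PySem.Set (Int × Int) → Bool
  | [], _, _ => false
  | c :: cs, (x, y), history =>
    let (dx, dy) := pvOffset c
    if PySem.Set.contains history (x + dx, y + dy) then true
    else pvLoopA cs (x + dx, y + dy) (PySem.Set.add history (x + dx, y + dy))

def judgeCircle2 (moves : String) : Bool :=
  pvLoopA moves.toList (0, 0) (PySem.Set.ofList [((0 : Int), (0 : Int))])

-- ===== PORT B =====
-- B's two per-coordinate dicts dxs / dys (fallback 0 unreachable under Pre_, as for A)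
def pvDxs (c : Char) : Int :=
  if c = 'U' then 0 else if c = 'D' then 0 else if c = 'L' then -1 else if c = 'R' then 1 else 0
def pvDys (c : Char) : Int :=
  if c = 'U' then 1 else if c = 'D' then -1 else if c = 'L' then 0 else if c = 'R' then 0 else 0

-- B's loop: append xs[-1]+dxs[m] to xs and ys[-1]+dys[m] to ys (xs, ys start at [0], never
-- empty, so the xs[-1] lookup — pyGetD with default 0 — never falls back)
def pvCoords : List Char → List Int → List Int → List Int × List Int
  | [], xs, ys => (xs, ys)
  | m :: ms, xs, ys =>
    pvCoords ms (xs ++ [PySem.List.pyGetD xs (-1) 0 + pvDxs m])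
                (ys ++ [PySem.List.pyGetD ys (-1) 0 + pvDys m])

def judgeCircle2_alt (moves : String) : Bool :=
  let (xs, ys) := pvCoords moves.toList [(0 : Int)] [(0 : Int)]
  let positions := xs.zip ys
  positions.any (fun p => decide (1 < positions.count p))

-- ===== PRECONDITION & SPEC =====
-- Pre_ excludes strings containing a character other than U/D/L/R: on those the offset-dict
-- lookup raises KeyError — in A possibly only after an early return True on a prefix revisit,
-- while B always scans the whole string and raises.
def Pre_judgeCircle2 (moves : String) : Prop :=
  (moves.toList.all fun c => c == 'U' || c == 'D' || c == 'L' || c == 'R') = true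
instance (moves : String) : Decidable (Pre_judgeCircle2 moves) := by
  unfold Pre_judgeCircle2; infer_instance

def pvWitness_judgeCircle2 : String := "UDLR"

def Spec_judgeCircle2 (moves : String) (out : Bool) : Prop := out = judgeCircle2_alt moves
instance (moves : String) (out : Bool) : Decidable (Spec_judgeCircle2 moves out) := by
  unfold Spec_judgeCircle2; infer_instance

-- ===== CLAIM (what is proved, stated in full; the proofs are below) =====
def Claim_equal_judgeCircle2 : Prop :=
  ∀ (moves : String), Dom_judgeCircle2 moves → Pre_judgeCircle2 moves →
    Spec_judgeCircle2 moves (judgeCircle2 moves)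

-- ===== LEMMAS AND PROOFS =====

-- the sequence of positions visited after each move, starting from p (p itself excluded)
def pvWalk : Int × Int → List Char → List (Int × Int)
  | _, [] => []
  | (x, y), c :: cs =>
    let (dx, dy) := pvOffset c
    (x + dx, y + dy) :: pvWalk (x + dx, y + dy) cs

lemma pvOffset_eq_dxs_dys (c : Char) : pvOffset c = (pvDxs c, pvDys c) := by
  unfold pvOffset pvDxs pvDys; split_ifs <;> rfl

lemma pvLoopA_eq_nodup (cs : List Char) :
    ∀ (p : Int × Int) (history : PySem.Set (Int × Int)), history.Nodup →
      pvLoopA cs p history = decide ¬(history ++ pvWalk p cs).Nodup := by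
  induction cs with
  | nil =>
    rintro ⟨x, y⟩ history hn
    simp [pvLoopA, pvWalk, hn]
  | cons c cs ih =>
    rintro ⟨x, y⟩ history hn
    simp only [pvLoopA, pvWalk]
    have key : ∀ q : Int × Int,
        (if PySem.Set.contains history q = true then true
         else pvLoopA cs q (PySem.Set.add history q)) =
          decide ¬(history ++ q :: pvWalk q cs).Nodup := by
      intro q
      by_cases hmem : q ∈ history
      · have hnd : ¬(history ++ q :: pvWalk q cs).Nodup := by
          intro h
          exact (List.nodup_append.mp h).2.2 q hmem q (List.mem_cons_self ..) rfl
        simp [PySem.Set.contains, hmem, hnd]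
      · have hc : PySem.Set.contains history q = false := by
          simpa [PySem.Set.contains] using hmem
        rw [hc]
        simp only [Bool.false_eq_true, if_false]
        rw [ih q _ (PySem.Set.nodup_add history q hn)]
        rw [PySem.Set.add_of_not_mem hmem]
        simp [List.append_assoc]
    exact key _

lemma pvLast_append (xs : List Int) (a : Int) :
    PySem.List.pyGetD (xs ++ [a]) (-1) 0 = a := by
  simp [PySem.List.pyGetD, PySem.List.pyGet?_neg_one]

-- B's two coordinate lists, zipped, are the start positions followed by the walk
lemma pvCoords_zip (ms : List Char) :
    ∀ (xs ys : List Int) (x y : Int), xs.length = ys.length →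
      PySem.List.pyGetD xs (-1) 0 = x → PySem.List.pyGetD ys (-1) 0 = y →
      (pvCoords ms xs ys).1.zip (pvCoords ms xs ys).2 = xs.zip ys ++ pvWalk (x, y) ms := by
  induction ms with
  | nil => intro xs ys x y _ _ _; simp [pvCoords, pvWalk]
  | cons m ms ih =>
    intro xs ys x y hlen hx hy
    simp only [pvCoords, pvWalk, pvOffset_eq_dxs_dys, hx, hy]
    rw [ih (xs ++ [x + pvDxs m]) (ys ++ [y + pvDys m]) (x + pvDxs m) (y + pvDys m)
          (by simp [hlen]) (pvLast_append ..) (pvLast_append ..)]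
    rw [List.zip_append (by omega)]
    simp

lemma pvCount_any_eq_not_nodup (l : List (Int × Int)) :
    l.any (fun p => decide (1 < l.count p)) = decide ¬l.Nodup := by
  rcases h : decide ¬l.Nodup with _ | _
  · have hnd : l.Nodup := by simpa using h
    simp only [List.any_eq_false]
    intro p _
    simp [Nat.lt_iff_add_one_le, List.nodup_iff_count_le_one.mp hnd p]
  · have hnd : ¬l.Nodup := by simpa using h
    rw [List.any_eq_true]
    rw [List.nodup_iff_count_le_one] at hnd
    push Not at hnd
    obtain ⟨p, hp⟩ := hnd
    exact ⟨p, List.count_pos_iff.mp (by omega), by simpa using hp⟩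

-- ===== VERDICT (by name: the statement is the Claim_ definition above) =====
theorem judgeCircle2_spec : Claim_equal_judgeCircle2 := by
  intro moves _ _
  unfold Spec_judgeCircle2 judgeCircle2 judgeCircle2_alt
  rw [pvLoopA_eq_nodup moves.toList (0, 0) _ (PySem.Set.nodup_ofList _)]
  have hof : PySem.Set.ofList [((0 : Int), (0 : Int))] = [((0 : Int), (0 : Int))] := by decide
  rw [hof]
  rcases hc : pvCoords moves.toList [0] [0] with ⟨xs, ys⟩
  have hz := pvCoords_zip moves.toList [0] [0] 0 0 rfl (by decide) (by decide)
  rw [hc] at hz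
  simp only [hz, pvCount_any_eq_not_nodup]
  rfl
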